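-- pv_equiv track=rewrite | github.com/where6713/AI-music-producer | src/producer_tools/self_check/gate_g6.py | _contains_requirement_baseline
-- ===== SOURCE A (Python) =====
-- def _contains_requirement_baseline(req_text: str) -> bool:
--     reqs = [line.strip() for line in req_text.splitlines() if line.strip()]
--     checks = {
--         "openai==": False,
--         "typer==": False,
--         "librosa==": False,
--         "pypinyin==": False,
--     }
--     for line in reqs:
--         for key in list(checks.keys()):
--             if line.startswith(key):
--                 checks[key] = True
--     return all(checks.values())
-- ===== SOURCE B (Python) =====
-- def _contains_requirement_baseline(req_text: str) -> bool:
--     found = set()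
--     for raw in req_text.splitlines():
--         line = raw.strip()
--         i = line.find("==")
--         if i != -1:
--             found.add(line[:i + 2])
--     return {"openai==", "typer==", "librosa==", "pypinyin=="}.issubset(found)
-- ===== Notes on version B (the rewrite author's own statement) =====
-- stated objective: alternative
-- what changed: Instead of testing every line against every pinned-package prefix (flag dict, lines x keys startswith product), B makes one pass that extracts each line's requirement specifier -- its prefix up to and including the first double-equals pin -- into a set, then answers with a single subset test of the four required specifiers against that set; correct because each key ends in its only double-equals, so a line starts with a key iff its extracted specifier equals the key.
import Mathlib
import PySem

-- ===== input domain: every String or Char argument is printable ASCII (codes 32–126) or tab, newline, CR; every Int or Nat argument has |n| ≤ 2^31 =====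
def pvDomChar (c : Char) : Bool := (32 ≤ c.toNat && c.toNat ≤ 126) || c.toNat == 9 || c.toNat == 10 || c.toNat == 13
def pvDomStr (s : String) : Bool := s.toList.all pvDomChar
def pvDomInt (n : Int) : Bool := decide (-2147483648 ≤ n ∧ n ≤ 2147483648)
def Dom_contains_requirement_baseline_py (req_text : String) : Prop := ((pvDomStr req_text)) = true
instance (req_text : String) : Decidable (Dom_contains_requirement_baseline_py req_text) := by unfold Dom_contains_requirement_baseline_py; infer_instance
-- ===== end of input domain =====

-- B replaces A's lines x keys startswith product (mutable flag dict) with one pass that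
-- extracts each line's specifier prefix (up to the first "==") into a set, then a single
-- subset test of the four required specifiers; alternative decomposition, same observable result.


-- ===== PORT A =====
-- one pass of the inner 'for key in list(checks.keys())' loop for one line
def pvStepA (checks : PySem.Dict String Bool) (line : String) : PySem.Dict String Bool :=
  checks.keys.foldl
    (fun c key => if PySem.Str.startswith line key then c.insert key true else c) checks

def contains_requirement_baseline_py (req_text : String) : Bool :=
  let reqs := (PySem.Str.splitlines req_text).filterMap
    (fun line => if PySem.Str.strip line = "" then none else some (PySem.Str.strip line))
  let checks : PySem.Dict String Bool :=
    PySem.Dict.ofList [("openai==", false), ("typer==", false), ("librosa==", false), ("pypinyin==", false)]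
  let final := reqs.foldl pvStepA checks
  final.values.all (fun v => v)

-- ===== PORT B =====
-- loop body of Source B: strip the raw line, find the first "==", add line[:i+2] to the set
def pvStepB (found : PySem.Set String) (raw : String) : PySem.Set String :=
  let line := PySem.Str.strip raw
  let i := PySem.Str.find line "=="
  if i != -1 then found.add (PySem.Str.slice line none (some (i + 2))) else found

def contains_requirement_baseline_py_alt (req_text : String) : Bool :=
  let found := (PySem.Str.splitlines req_text).foldl pvStepB PySem.Set.empty
  PySem.Set.issubset (PySem.Set.ofList ["openai==", "typer==", "librosa==", "pypinyin=="]) found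

-- ===== PRECONDITION & SPEC =====
def Spec_contains_requirement_baseline_py (req_text : String) (out : Bool) : Prop := out = contains_requirement_baseline_py_alt req_text
instance (req_text : String) (out : Bool) : Decidable (Spec_contains_requirement_baseline_py req_text out) := by unfold Spec_contains_requirement_baseline_py; infer_instance

-- ===== CLAIM (what is proved, stated in full; the proofs are below) =====
def Claim_equal_contains_requirement_baseline_py : Prop := ∀ (req_text : String), Dom_contains_requirement_baseline_py req_text → Spec_contains_requirement_baseline_py req_text (contains_requirement_baseline_py req_text)

-- ===== LEMMAS AND PROOFS =====

-- A-side: one step of A's fold on a dict in the canonical 4-key shape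
theorem pvStepA_shape (a b c e : Bool) (line : String) :
    pvStepA (PySem.Dict.mk [("openai==", a), ("typer==", b), ("librosa==", c), ("pypinyin==", e)]) line
    = PySem.Dict.mk [("openai==", a || PySem.Str.startswith line "openai=="),
                     ("typer==", b || PySem.Str.startswith line "typer=="),
                     ("librosa==", c || PySem.Str.startswith line "librosa=="),
                     ("pypinyin==", e || PySem.Str.startswith line "pypinyin==")] := by
  unfold pvStepA
  simp only [PySem.Dict.keys_mk, List.map_cons, List.map_nil, List.foldl_cons, List.foldl_nil]
  by_cases h1 : PySem.Chars.startswith line.toList ['o','p','e','n','a','i','=','='] = true <;>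
    by_cases h2 : PySem.Chars.startswith line.toList ['t','y','p','e','r','=','='] = true <;>
      by_cases h3 : PySem.Chars.startswith line.toList ['l','i','b','r','o','s','a','=','='] = true <;>
        by_cases h4 : PySem.Chars.startswith line.toList ['p','y','p','i','n','y','i','n','=','='] = true <;>
          simp [h1, h2, h3, h4, PySem.Dict.insert]

-- A-side: A's fold over the stripped nonempty lines, with the four flags generalized
theorem pvFoldA (reqs : List String) (a b c e : Bool) :
    reqs.foldl pvStepA (PySem.Dict.mk [("openai==", a), ("typer==", b), ("librosa==", c), ("pypinyin==", e)])
    = PySem.Dict.mk [("openai==", a || reqs.any (fun l => PySem.Str.startswith l "openai==")),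
                     ("typer==", b || reqs.any (fun l => PySem.Str.startswith l "typer==")),
                     ("librosa==", c || reqs.any (fun l => PySem.Str.startswith l "librosa==")),
                     ("pypinyin==", e || reqs.any (fun l => PySem.Str.startswith l "pypinyin=="))] := by
  induction reqs generalizing a b c e with
  | nil => simp
  | cons hd tl ih =>
      simp only [List.foldl_cons, pvStepA_shape, ih, List.any_cons]
      simp [Bool.or_assoc]

-- A-side: a filtered-out (all-whitespace) line never starts with a nonempty key,
-- so 'any' over the strip-filtered list equals 'any' of strip-startswith over all lines
theorem pvAny_filterMap (lines : List String) (key : String) (hk : key ≠ "") :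
    ((lines.filterMap (fun line => if PySem.Str.strip line = "" then none else some (PySem.Str.strip line))).any
        (fun l => PySem.Str.startswith l key))
    = lines.any (fun line => PySem.Str.startswith (PySem.Str.strip line) key) := by
  induction lines with
  | nil => rfl
  | cons hd tl ih =>
      by_cases h : PySem.Str.strip hd = ""
      · rw [List.filterMap_cons_none (by simp [h]), ih, List.any_cons]
        have hsw : PySem.Str.startswith (PySem.Str.strip hd) key = false := by
          rw [h, Bool.eq_false_iff]
          intro ht
          simp only [PySem.Str.startswith_eq] at ht
          have h2 := (PySem.Chars.startswith_iff _ _).mp ht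
          simp only [show ("" : String).toList = [] from rfl, List.prefix_nil] at h2
          exact hk (String.toList_inj.mp h2)
        rw [hsw, Bool.false_or]
      · rw [List.filterMap_cons_some (f := fun line => if PySem.Str.strip line = "" then none else some (PySem.Str.strip line)) (b := PySem.Str.strip hd) (by simp [h]), List.any_cons, List.any_cons, ih]

-- B-side key fact: for a key whose only "==" is its final two characters, a line's extracted
-- specifier (its prefix up to and including the FIRST "==") equals the key iff the line starts
-- with the key.
theorem pvExtract_iff (k line : List Char)
    (hlen : 2 ≤ k.length)
    (hsuf : k.drop (k.length - 2) = ['=', '='])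
    (hno : ∀ i < k.length - 2, ¬ (['=', '='] <+: k.drop i)) :
    (PySem.Chars.find line ['=', '='] ≠ -1 ∧
      PySem.Chars.slice line none (some (PySem.Chars.find line ['=', '='] + 2)) = k)
    ↔ k <+: line := by
  constructor
  · rintro ⟨hne, hs⟩
    have h0 : 0 ≤ PySem.Chars.find line ['=', '='] := by
      have := PySem.Chars.neg_one_le_find line ['=', '=']
      omega
    simp only [PySem.Chars.slice] at hs
    rw [PySem.List.slice_to line (by omega)] at hs
    rw [← hs]
    exact List.take_prefix _ _
  · intro hpre
    have h1 : ['=', '='] <+: line.drop (k.length - 2) := by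
      have := hpre.drop (k.length - 2)
      rw [hsuf] at this
      exact this
    have hinf : ['=', '='] <:+: line := by
      rw [← PySem.Chars.isIn_iff_infix, ← PySem.Chars.exists_prefix_drop_iff_isIn]
      exact ⟨_, h1⟩
    have h0 : 0 ≤ PySem.Chars.find line ['=', '='] := (PySem.Chars.find_nonneg_iff line _).mpr hinf
    obtain ⟨hfp, hmin⟩ := PySem.Chars.find_spec h0
    have hklen : k.length ≤ line.length := hpre.length_le
    -- the first "==" is not before position k.length - 2
    have hge : ¬ (PySem.Chars.find line ['=', '=']).toNat < k.length - 2 := by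
      intro hlt
      have hdp : k.drop (PySem.Chars.find line ['=', '=']).toNat <+: line.drop (PySem.Chars.find line ['=', '=']).toNat :=
        hpre.drop _
      have : ['=', '='] <+: k.drop (PySem.Chars.find line ['=', '=']).toNat := by
        refine List.prefix_of_prefix_length_le hfp hdp ?_
        simp only [List.length_drop, List.length_cons, List.length_nil]
        omega
      exact hno _ hlt this
    -- and not after it either
    have hle : (PySem.Chars.find line ['=', '=']).toNat ≤ k.length - 2 := by
      by_contra hgt
      exact hmin (k.length - 2) (by omega) h1
    have heq : (PySem.Chars.find line ['=', '=']).toNat = k.length - 2 := by omega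
    have hf : PySem.Chars.find line ['=', '='] = ((k.length - 2 : Nat) : Int) := by
      omega
    constructor
    · omega
    · rw [hf]
      have hb : ((k.length - 2 : Nat) : Int) + 2 = ((k.length : Nat) : Int) := by omega
      simp only [PySem.Chars.slice]
      rw [hb, PySem.List.slice_to_natCast line k.length]
      exact (List.prefix_iff_eq_take.mp hpre).symm
-- B-side: membership in the set built by B's fold
theorem pvMem_foldB (lines : List String) (acc : PySem.Set String) (k : String) :
    (k ∈ lines.foldl pvStepB acc) ↔
      k ∈ acc ∨ ∃ raw ∈ lines,
        PySem.Str.find (PySem.Str.strip raw) "==" ≠ -1 ∧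
        PySem.Str.slice (PySem.Str.strip raw) none (some (PySem.Str.find (PySem.Str.strip raw) "==" + 2)) = k := by
  induction lines generalizing acc with
  | nil => simp
  | cons hd tl ih =>
      simp only [List.foldl_cons, ih, List.mem_cons]
      unfold pvStepB
      by_cases h : PySem.Str.find (PySem.Str.strip hd) "==" ≠ -1
      · simp only [h, bne_iff_ne, ne_eq, not_false_eq_true, if_pos]
        rw [PySem.Set.mem_add]
        constructor
        · rintro (⟨hm | he⟩ | ⟨raw, hr, hc⟩)
          · exact Or.inl hm
          · exact Or.inr ⟨hd, Or.inl rfl, h, he.symm⟩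
          · exact Or.inr ⟨raw, Or.inr hr, hc⟩
        · rintro (hm | ⟨raw, (rfl | hr), hc⟩)
          · exact Or.inl (Or.inl hm)
          · exact Or.inl (Or.inr hc.2.symm)
          · exact Or.inr ⟨raw, hr, hc⟩
      · simp only [ne_eq, not_not] at h
        simp only [h, bne_self_eq_false, Bool.false_eq_true, if_false]
        constructor
        · rintro (hm | ⟨raw, hr, hc⟩)
          · exact Or.inl hm
          · exact Or.inr ⟨raw, Or.inr hr, hc⟩
        · rintro (hm | ⟨raw, (rfl | hr), hc⟩)
          · exact Or.inl hm
          · exact absurd h hc.1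
          · exact Or.inr ⟨raw, hr, hc⟩

-- B-side: 'key found by B' = 'some line strip-startswith key', for each of the four keys
theorem pvFoundB (lines : List String) (k : String)
    (hlen : 2 ≤ k.toList.length)
    (hsuf : k.toList.drop (k.toList.length - 2) = ['=', '='])
    (hno : ∀ i < k.toList.length - 2, ¬ (['=', '='] <+: k.toList.drop i)) :
    (lines.foldl pvStepB PySem.Set.empty).contains k
    = lines.any (fun raw => PySem.Str.startswith (PySem.Str.strip raw) k) := by
  rw [Bool.eq_iff_iff]
  rw [PySem.Set.contains, List.contains_iff_mem, pvMem_foldB, List.any_eq_true]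
  constructor
  · rintro (hm | ⟨raw, hr, hne, hs⟩)
    · simp [PySem.Set.empty] at hm
    · refine ⟨raw, hr, ?_⟩
      rw [PySem.Str.startswith_eq, PySem.Chars.startswith_iff]
      refine (pvExtract_iff k.toList (PySem.Str.strip raw).toList hlen hsuf hno).mp ⟨?_, ?_⟩
      · rwa [PySem.Str.find_eq] at hne
      · have h2 := congrArg String.toList hs
        rw [PySem.Str.toList_slice] at h2
        simpa [PySem.Str.find_eq, show ("==" : String).toList = ['=', '='] from rfl] using h2
  · rintro ⟨raw, hr, hsw⟩
    right
    rw [PySem.Str.startswith_eq, PySem.Chars.startswith_iff] at hsw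
    obtain ⟨hne, hs⟩ := (pvExtract_iff k.toList (PySem.Str.strip raw).toList hlen hsuf hno).mpr hsw
    refine ⟨raw, hr, ?_, ?_⟩
    · rwa [PySem.Str.find_eq]
    · apply String.toList_inj.mp
      rw [PySem.Str.toList_slice]
      simpa [PySem.Str.find_eq] using hs

-- ===== VERDICT (by name: the statement is the Claim_ definition above) =====
theorem contains_requirement_baseline_py_spec : Claim_equal_contains_requirement_baseline_py := by
  intro req_text _
  unfold Spec_contains_requirement_baseline_py
  have hof : (PySem.Dict.ofList [("openai==", false), ("typer==", false), ("librosa==", false), ("pypinyin==", false)] : PySem.Dict String Bool)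
      = PySem.Dict.mk [("openai==", false), ("typer==", false), ("librosa==", false), ("pypinyin==", false)] := by decide
  simp only [contains_requirement_baseline_py, contains_requirement_baseline_py_alt, hof, pvFoldA,
    pvAny_filterMap _ "openai==" (by decide), pvAny_filterMap _ "typer==" (by decide),
    pvAny_filterMap _ "librosa==" (by decide), pvAny_filterMap _ "pypinyin==" (by decide)]
  rw [show (PySem.Set.ofList ["openai==", "typer==", "librosa==", "pypinyin=="] : PySem.Set String)
      = ["openai==", "typer==", "librosa==", "pypinyin=="] from by decide]
  simp only [PySem.Set.issubset, List.all_cons, List.all_nil,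
    pvFoundB _ "openai==" (by decide) (by decide) (by decide),
    pvFoundB _ "typer==" (by decide) (by decide) (by decide),
    pvFoundB _ "librosa==" (by decide) (by decide) (by decide),
    pvFoundB _ "pypinyin==" (by decide) (by decide) (by decide)]
  simp [PySem.Dict.values, List.all]
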